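-- pv_equiv track=rewrite | github.com/pypi-data/pypi-mirror-342 | packages/xython/xython-4.0.6-py3-none-any.whl/xython/xy_util.py | filter_index_element_in_list_1d_for_list_2d
-- ===== SOURCE A (Python) =====
-- def filter_index_element_in_list_1d_for_list_2d(input_list_2d, input_no_list):
-- 	"""
-- 	input_no_list.sort()
-- 	input_no_list.reverse()
--
-- 	:param input_list_2d:
-- 	:param input_no_list:
-- 	:return:
-- 	"""
-- 	for before, after in input_no_list:
-- 		for no in range(len(input_list_2d)):
-- 			value1 = input_list_2d[no][before]
-- 			value2 = input_list_2d[no][after]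
-- 			input_list_2d[no][before] = value2
-- 			input_list_2d[no][after] = value1
-- 	return input_list_2d
-- ===== SOURCE B (Python) =====
-- def filter_index_element_in_list_1d_for_list_2d(input_list_2d, input_no_list):
-- 	# B: compose all pairs into one column permutation per row, then remap each
-- 	# row in a single pass (rows are mutated in place, as in A).
-- 	for row in input_list_2d:
-- 		perm = list(range(len(row)))
-- 		for before, after in input_no_list:
-- 			perm[before], perm[after] = perm[after], perm[before]
-- 		row[:] = [row[j] for j in perm]
-- 	return input_list_2d
-- ===== Notes on version B (the rewrite author's own statement) =====
-- stated objective: faster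
-- what changed: B makes one pass over the rows, composing all swap pairs into a single column permutation and remapping the row element-wise, instead of A's sweep of the whole matrix once per pair.
import Mathlib
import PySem

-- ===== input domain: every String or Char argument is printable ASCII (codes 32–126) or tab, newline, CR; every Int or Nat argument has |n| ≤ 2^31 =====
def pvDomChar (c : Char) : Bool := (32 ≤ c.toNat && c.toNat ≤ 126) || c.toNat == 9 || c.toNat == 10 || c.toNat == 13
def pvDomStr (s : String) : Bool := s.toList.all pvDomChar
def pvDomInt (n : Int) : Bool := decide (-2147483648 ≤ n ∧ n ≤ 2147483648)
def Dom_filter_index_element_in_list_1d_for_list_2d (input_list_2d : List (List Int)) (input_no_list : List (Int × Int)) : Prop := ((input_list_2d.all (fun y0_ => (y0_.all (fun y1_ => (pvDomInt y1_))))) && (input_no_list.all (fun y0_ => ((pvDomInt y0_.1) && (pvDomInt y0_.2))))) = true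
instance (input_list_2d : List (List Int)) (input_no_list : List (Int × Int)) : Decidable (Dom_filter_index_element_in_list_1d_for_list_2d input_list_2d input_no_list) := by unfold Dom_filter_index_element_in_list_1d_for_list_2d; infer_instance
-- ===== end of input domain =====

-- B composes all swap pairs into a single column permutation per row and remaps each row
-- in one pass (alternative decomposition); both A and B mutate the inner rows in place in
-- Python, and the equivalence proved here is about the returned value.


-- ===== PORT A =====
-- swap of two (possibly negative) positions of a list: value1 = xs[b]; value2 = xs[a]; xs[b] = value2; xs[a] = value1
-- value1 = xs[b]; value2 = xs[a]; xs[b] = value2; xs[a] = value1 (values inlined)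
def pvSwapAt (xs : List Int) (b a : Int) : List Int :=
  PySem.List.pySetD (PySem.List.pySetD xs b (PySem.List.pyGetD xs a 0)) a
    (PySem.List.pyGetD xs b 0)

def filter_index_element_in_list_1d_for_list_2d (input_list_2d : List (List Int)) (input_no_list : List (Int × Int)) : List (List Int) :=
  input_no_list.foldl (fun m p =>
    (PySem.List.pyRange 0 m.length 1).foldl (fun m' no =>
      PySem.List.pySetD m' no (pvSwapAt (PySem.List.pyGetD m' no []) p.1 p.2)) m) input_list_2d

-- ===== PORT B =====
def filter_index_element_in_list_1d_for_list_2d_alt (input_list_2d : List (List Int)) (input_no_list : List (Int × Int)) : List (List Int) :=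
  input_list_2d.map (fun row =>
    let perm := input_no_list.foldl (fun perm p => pvSwapAt perm p.1 p.2)
      (PySem.List.pyRange 0 row.length 1)
    perm.map (fun j => PySem.List.pyGetD row j 0))

-- ===== PRECONDITION & SPEC =====
-- Pre_ excludes exactly the inputs on which Python A raises IndexError: some pair holds a
-- column index out of range (|i| semantics of Python) for some row.
def Pre_filter_index_element_in_list_1d_for_list_2d (input_list_2d : List (List Int)) (input_no_list : List (Int × Int)) : Prop :=
  ∀ row ∈ input_list_2d, ∀ p ∈ input_no_list,
    PySem.Raise.InRange row.length p.1 ∧ PySem.Raise.InRange row.length p.2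
instance (input_list_2d : List (List Int)) (input_no_list : List (Int × Int)) : Decidable (Pre_filter_index_element_in_list_1d_for_list_2d input_list_2d input_no_list) := by unfold Pre_filter_index_element_in_list_1d_for_list_2d; infer_instance

def pvWitness_filter_index_element_in_list_1d_for_list_2d : List (List Int) × (List (Int × Int)) :=
  ([[1, 2, 3], [4, 5, 6]], [(0, 2), (1, -1)])

def Spec_filter_index_element_in_list_1d_for_list_2d (input_list_2d : List (List Int)) (input_no_list : List (Int × Int)) (out : List (List Int)) : Prop := out = filter_index_element_in_list_1d_for_list_2d_alt input_list_2d input_no_list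
instance (input_list_2d : List (List Int)) (input_no_list : List (Int × Int)) (out : List (List Int)) : Decidable (Spec_filter_index_element_in_list_1d_for_list_2d input_list_2d input_no_list out) := by unfold Spec_filter_index_element_in_list_1d_for_list_2d; infer_instance

-- ===== CLAIM (what is proved, stated in full; the proofs are below) =====
def Claim_equal_filter_index_element_in_list_1d_for_list_2d : Prop := ∀ (input_list_2d : List (List Int)) (input_no_list : List (Int × Int)), Dom_filter_index_element_in_list_1d_for_list_2d input_list_2d input_no_list → Pre_filter_index_element_in_list_1d_for_list_2d input_list_2d input_no_list → Spec_filter_index_element_in_list_1d_for_list_2d input_list_2d input_no_list (filter_index_element_in_list_1d_for_list_2d input_list_2d input_no_list)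

-- ===== LEMMAS AND PROOFS =====

-- normalised (Nat) index of a Python index i into a list of length L
def pvNidx (L : Nat) (i : Int) : Nat := if 0 ≤ i then i.toNat else L - (-i).toNat

theorem pvIdx_eq {L : Nat} {i : Int} (h : PySem.Raise.InRange L i) :
    PySem.List.pyIdx? L i = some (pvNidx L i) := by
  obtain ⟨h1, h2⟩ := h
  unfold PySem.List.pyIdx? pvNidx
  split_ifs with h0
  · simp
  · simp

theorem pvNidx_lt {L : Nat} {i : Int} (h : PySem.Raise.InRange L i) : pvNidx L i < L := by
  obtain ⟨h1, h2⟩ := h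
  unfold pvNidx
  split_ifs with h0 <;> omega

theorem pvGetD_eq {xs : List Int} {i : Int} (d : Int) (h : PySem.Raise.InRange xs.length i) :
    PySem.List.pyGetD xs i d = xs[pvNidx xs.length i]'(pvNidx_lt h) := by
  simp [PySem.List.pyGetD, PySem.List.pyGet?, pvIdx_eq h,
    List.getElem?_eq_getElem (pvNidx_lt h)]

theorem pvSetD_eq {xs : List Int} {i : Int} (v : Int) (h : PySem.Raise.InRange xs.length i) :
    PySem.List.pySetD xs i v = xs.set (pvNidx xs.length i) v := by
  simp [PySem.List.pySetD, PySem.List.pySet?, pvIdx_eq h]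

theorem pvSwapAt_length (xs : List Int) (b a : Int) :
    (pvSwapAt xs b a).length = xs.length := by
  simp [pvSwapAt, PySem.List.length_pySetD]

-- the swap commutes with mapping a lookup over the permutation
theorem pvSwapAt_map (perm : List Int) (g : Int → Int) (b a : Int)
    (hb : PySem.Raise.InRange perm.length b) (ha : PySem.Raise.InRange perm.length a) :
    pvSwapAt (perm.map g) b a = (pvSwapAt perm b a).map g := by
  have hb' : PySem.Raise.InRange (perm.map g).length b := by simpa using hb
  have ha' : PySem.Raise.InRange (perm.map g).length a := by simpa using ha
  have hkb := pvNidx_lt hb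
  have hka := pvNidx_lt ha
  unfold pvSwapAt
  rw [pvGetD_eq 0 hb', pvGetD_eq 0 ha', pvGetD_eq 0 hb, pvGetD_eq 0 ha,
      pvSetD_eq _ hb', pvSetD_eq _ hb,
      pvSetD_eq _ (show PySem.Raise.InRange
        ((perm.map g).set (pvNidx (perm.map g).length b)
          ((perm.map g)[pvNidx (perm.map g).length a]'(pvNidx_lt ha'))).length a by
        simpa using ha),
      pvSetD_eq _ (show PySem.Raise.InRange
        ((perm.set (pvNidx perm.length b) (perm[pvNidx perm.length a]'hka))).length a by
        simpa using ha)]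
  simp [List.getElem_map]

-- swapping preserves the length, through a whole fold as well
theorem pvFoldSwap_length (ps : List (Int × Int)) :
    ∀ xs : List Int,
      (ps.foldl (fun perm p => pvSwapAt perm p.1 p.2) xs).length = xs.length := by
  induction ps with
  | nil => intro xs; rfl
  | cons p ps ih => intro xs; rw [List.foldl_cons, ih, pvSwapAt_length]

-- B's identity permutation maps back to the row itself
theorem pvPerm0_map (row : List Int) :
    (PySem.List.pyRange 0 row.length 1).map (fun j => PySem.List.pyGetD row j 0) = row := by
  simpa [PySem.List.len] using PySem.List.map_pyGetD_pyRange_zero row 0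

-- per-row core: sequential swapping of values = composing swaps on the identity permutation, then remapping
theorem pvRow_eq (row : List Int) (ps : List (Int × Int))
    (hps : ∀ p ∈ ps, PySem.Raise.InRange row.length p.1 ∧ PySem.Raise.InRange row.length p.2) :
    ps.foldl (fun r p => pvSwapAt r p.1 p.2) row
      = (ps.foldl (fun perm p => pvSwapAt perm p.1 p.2)
          (PySem.List.pyRange 0 row.length 1)).map (fun j => PySem.List.pyGetD row j 0) := by
  induction ps using List.reverseRecOn with
  | nil => simpa using (pvPerm0_map row).symm
  | append_singleton ps p ih =>
    have hps' : ∀ q ∈ ps, PySem.Raise.InRange row.length q.1 ∧ PySem.Raise.InRange row.length q.2 := by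
      intro q hq; exact hps q (by simp [hq])
    have hp := hps p (by simp)
    have hlen : (ps.foldl (fun perm q => pvSwapAt perm q.1 q.2)
        (PySem.List.pyRange 0 row.length 1)).length = row.length := by
      rw [pvFoldSwap_length]
      simp [PySem.List.length_pyRange_one]
    rw [List.foldl_append, List.foldl_append]
    simp only [List.foldl_cons, List.foldl_nil]
    rw [ih hps']
    exact pvSwapAt_map _ _ _ _ (by rw [hlen]; exact hp.1) (by rw [hlen]; exact hp.2)

-- A's inner row loop (indexed read/modify/write over range(len)) is a map over the rows
theorem pvInnerAux (f : List Int → List Int) (post : List (List Int)) :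
    ∀ pre : List (List Int),
      (PySem.List.pyRange (pre.length : Int) ((pre.length : Int) + post.length) 1).foldl
        (fun m' no => PySem.List.pySetD m' no (f (PySem.List.pyGetD m' no []))) (pre ++ post)
      = pre ++ post.map f := by
  induction post with
  | nil => intro pre; simp [PySem.List.pyRange_one_eq_nil]
  | cons r rest ih =>
    intro pre
    have hlt : (pre.length : Int) < (pre.length : Int) + ((r :: rest).length : Int) := by
      simp
    rw [PySem.List.pyRange_one_cons hlt]
    simp only [List.foldl_cons]
    have hget : PySem.List.pyGetD (pre ++ r :: rest) (pre.length : Int) [] = r := by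
      simp [PySem.List.pyGetD]
    have hset : PySem.List.pySetD (pre ++ r :: rest) (pre.length : Int) (f r)
        = (pre ++ [f r]) ++ rest := by
      rw [PySem.List.pySetD_of_nonneg _ _ (by positivity)]
      simp [List.append_assoc]
    rw [hget, hset]
    have key := ih (pre ++ [f r])
    have h1 : ((pre ++ [f r]).length : Int) = (pre.length : Int) + 1 := by simp
    rw [h1] at key
    have h2 : (pre.length : Int) + ((r :: rest).length : Int)
        = (pre.length : Int) + 1 + (rest.length : Int) := by simp; omega
    rw [h2]
    exact key.trans (by simp [List.append_assoc])

theorem pvInner_eq (f : List Int → List Int) (m : List (List Int)) :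
    (PySem.List.pyRange 0 (m.length : Int) 1).foldl
      (fun m' no => PySem.List.pySetD m' no (f (PySem.List.pyGetD m' no []))) m
    = m.map f := by
  have := pvInnerAux f m []
  simpa using this

-- outer pair loop of per-pair maps = single map of per-row folds
theorem pvFoldlMap (sw : List Int → Int × Int → List Int) (ps : List (Int × Int)) :
    ∀ m : List (List Int),
      ps.foldl (fun m p => m.map (fun r => sw r p)) m = m.map (fun r => ps.foldl sw r) := by
  induction ps with
  | nil => intro m; simp
  | cons p ps ih =>
    intro m
    simp only [List.foldl_cons]
    rw [ih (m.map (fun r => sw r p))]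
    simp [List.map_map, Function.comp]

-- ===== VERDICT (by name: the statement is the Claim_ definition above) =====
theorem filter_index_element_in_list_1d_for_list_2d_spec : Claim_equal_filter_index_element_in_list_1d_for_list_2d := by
  intro m ps _hdom hpre
  unfold Spec_filter_index_element_in_list_1d_for_list_2d
  unfold filter_index_element_in_list_1d_for_list_2d filter_index_element_in_list_1d_for_list_2d_alt
  have hstep : (fun (m : List (List Int)) (p : Int × Int) =>
      (PySem.List.pyRange 0 (m.length : Int) 1).foldl (fun m' no =>
        PySem.List.pySetD m' no (pvSwapAt (PySem.List.pyGetD m' no []) p.1 p.2)) m)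
      = (fun m p => m.map (fun r => pvSwapAt r p.1 p.2)) :=
    funext fun m => funext fun p => pvInner_eq (fun r => pvSwapAt r p.1 p.2) m
  rw [hstep, pvFoldlMap]
  apply List.map_congr_left
  intro row hrow
  exact pvRow_eq row ps (fun p hp => hpre row hrow p hp)
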